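-- pv_equiv track=rewrite | github.com/r1243962624-sys/sub-agent-test | videomind/core/batch_manager.py | _create_intelligent_batches
-- ===== SOURCE A (Python) =====
-- from typing import Dict, Any, List, Optional, Callable, Tuple
--
-- def _create_intelligent_batches(urls: List[str], max_workers: int) -> List[List[str]]:
--     """
--     创建智能批次
--
--     Args:
--         urls: URL列表
--         max_workers: 最大工作线程数
--
--     Returns:
--         List[List[str]]: 批次列表
--     """
--     # 简单分批：根据工作线程数平均分配
--     batch_size = max(1, len(urls) // max_workers)
--     batches = []
--
--     for i in range(0, len(urls), batch_size):
--         batch = urls[i:i + batch_size]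
--         if batch:
--             batches.append(batch)
--
--     # 如果批次太多，合并小批次
--     if len(batches) > max_workers * 2:
--         merged_batches = []
--         current_batch = []
--         target_size = len(urls) // max_workers
--
--         for batch in batches:
--             current_batch.extend(batch)
--             if len(current_batch) >= target_size:
--                 merged_batches.append(current_batch)
--                 current_batch = []
--
--         if current_batch:
--             merged_batches.append(current_batch)
--
--         batches = merged_batches
--
--     return batches
-- ===== SOURCE B (Python) =====
-- def _create_intelligent_batches(urls, max_workers):
--     # One element-wise pass: fill a fixed-size batch and flush it when full
--     # (A's conditional merge phase is a provable no-op, so it is omitted).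
--     batch_size = max(1, len(urls) // max_workers)
--     batches = []
--     batch = []
--     for url in urls:
--         batch.append(url)
--         if len(batch) == batch_size:
--             batches.append(batch)
--             batch = []
--     if batch:
--         batches.append(batch)
--     return batches
-- ===== Notes on version B (the rewrite author's own statement) =====
-- stated objective: simpler
-- what changed: B drops A's dead merge phase (its condition only fires for negative max_workers, where the merge is an identity) and replaces A's index-range loop over list slices by a single element-wise pass that fills a fixed-size batch and flushes it when full.
import Mathlib
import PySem

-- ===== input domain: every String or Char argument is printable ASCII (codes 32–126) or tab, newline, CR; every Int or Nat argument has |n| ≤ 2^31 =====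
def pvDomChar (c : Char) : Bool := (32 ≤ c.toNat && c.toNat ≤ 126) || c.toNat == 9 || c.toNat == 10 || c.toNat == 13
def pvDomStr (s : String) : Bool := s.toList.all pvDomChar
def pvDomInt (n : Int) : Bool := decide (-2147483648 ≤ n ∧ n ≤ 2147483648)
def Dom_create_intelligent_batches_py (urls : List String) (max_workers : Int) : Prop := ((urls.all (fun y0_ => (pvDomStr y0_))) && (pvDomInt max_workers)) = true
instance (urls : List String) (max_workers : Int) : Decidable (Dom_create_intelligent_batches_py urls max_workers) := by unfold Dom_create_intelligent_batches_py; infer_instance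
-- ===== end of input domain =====

-- B drops A's dead merge phase (unreachable as a rebatching) and builds the batches in one
-- element-wise fill-and-flush pass, instead of A's index-range loop over slices. Objective: simpler.

-- ===== PORT A =====
def create_intelligent_batches_py (urls : List String) (max_workers : Int) : List (List String) :=
  let n : Int := urls.length
  let batch_size : Int := max 1 (PySem.Int.floordiv n max_workers)
  -- for i in range(0, len(urls), batch_size): batch = urls[i:i+batch_size]; if batch: batches.append(batch)
  let batches : List (List String) :=
    (PySem.List.pyRange 0 n batch_size).foldl (fun acc i =>
      if PySem.List.slice urls (some i) (some (i + batch_size)) ≠ []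
      then acc ++ [PySem.List.slice urls (some i) (some (i + batch_size))]
      else acc) []
  if (batches.length : Int) > max_workers * 2 then
    let target_size : Int := PySem.Int.floordiv n max_workers
    -- current_batch.extend(batch); if len(current_batch) >= target_size: append and reset
    let p : List (List String) × List String :=
      batches.foldl (fun st b =>
        if ((st.2 ++ b).length : Int) ≥ target_size
        then (st.1 ++ [st.2 ++ b], ([] : List String))
        else (st.1, st.2 ++ b))
        ([], [])
    if p.2 ≠ [] then p.1 ++ [p.2] else p.1
  else
    batches

-- ===== PORT B =====
def create_intelligent_batches_py_alt (urls : List String) (max_workers : Int) : List (List String) :=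
  let batch_size : Int := max 1 (PySem.Int.floordiv (urls.length : Int) max_workers)
  -- for url in urls: batch.append(url); if len(batch) == batch_size: flush
  let st : List (List String) × List String :=
    urls.foldl (fun st url =>
      if ((st.2 ++ [url]).length : Int) = batch_size
      then (st.1 ++ [st.2 ++ [url]], ([] : List String))
      else (st.1, st.2 ++ [url])) ([], [])
  if st.2 ≠ [] then st.1 ++ [st.2] else st.1

-- ===== PRECONDITION & SPEC =====
-- Python raises ZeroDivisionError on max_workers == 0 (in both A and B); excluded.
def Pre_create_intelligent_batches_py (urls : List String) (max_workers : Int) : Prop := max_workers ≠ 0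
instance (urls : List String) (max_workers : Int) : Decidable (Pre_create_intelligent_batches_py urls max_workers) := by unfold Pre_create_intelligent_batches_py; infer_instance
def pvWitness_create_intelligent_batches_py : List String × Int := (["a", "b", "c"], 2)

def Spec_create_intelligent_batches_py (urls : List String) (max_workers : Int) (out : List (List String)) : Prop := out = create_intelligent_batches_py_alt urls max_workers
instance (urls : List String) (max_workers : Int) (out : List (List String)) : Decidable (Spec_create_intelligent_batches_py urls max_workers out) := by unfold Spec_create_intelligent_batches_py; infer_instance

-- ===== CLAIM (what is proved, stated in full; the proofs are below) =====
def Claim_equal_create_intelligent_batches_py : Prop := ∀ (urls : List String) (max_workers : Int), Dom_create_intelligent_batches_py urls max_workers → Pre_create_intelligent_batches_py urls max_workers → Spec_create_intelligent_batches_py urls max_workers (create_intelligent_batches_py urls max_workers)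

-- ===== LEMMAS AND PROOFS =====

-- the chunking both programs compute: repeatedly split off the first bs elements (bs ≥ 1)
def pvChunk (bs : Nat) : List String → List (List String)
  | [] => []
  | x :: xs => (x :: xs.take (bs - 1)) :: pvChunk bs (xs.drop (bs - 1))
termination_by l => l.length
decreasing_by simp [List.length_drop]

-- number of chunks of width bs in a list of length n
def pvCnt (n bs : Nat) : Nat := if n = 0 then 0 else (n - 1) / bs + 1

-- A's first loop appends every slice, since each is nonempty
theorem pv_foldA (urls : List String) (bs : Int) :
    ∀ (l : List Int) (acc : List (List String)),
      (∀ i ∈ l, PySem.List.slice urls (some i) (some (i + bs)) ≠ []) →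
      l.foldl (fun acc i =>
          if PySem.List.slice urls (some i) (some (i + bs)) ≠ []
          then acc ++ [PySem.List.slice urls (some i) (some (i + bs))]
          else acc) acc
        = acc ++ l.map (fun i => PySem.List.slice urls (some i) (some (i + bs))) := by
  intro l
  induction l with
  | nil => intro acc _; simp
  | cons i t ih =>
    intro acc h
    have hi := h i (by simp)
    simp only [List.foldl_cons, List.map_cons]
    rw [if_pos hi, ih _ (fun j hj => h j (by simp [hj]))]
    simp

-- the range-of-slices map IS pvChunk
theorem pv_chunk_map (bs : Nat) (hbs : 1 ≤ bs) :
    ∀ urls : List String,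
      (List.range (pvCnt urls.length bs)).map (fun k => (urls.drop (k * bs)).take bs)
        = pvChunk bs urls := by
  have H : ∀ (N : Nat) (urls : List String), urls.length ≤ N →
      (List.range (pvCnt urls.length bs)).map (fun k => (urls.drop (k * bs)).take bs)
        = pvChunk bs urls := by
    intro N
    induction N with
    | zero =>
      intro urls hlen
      have : urls = [] := List.eq_nil_of_length_eq_zero (by omega)
      subst this; simp [pvCnt, pvChunk]
    | succ N ihN =>
      intro urls hlen
      match urls with
      | [] => simp [pvCnt, pvChunk]
      | x :: xs =>
        have hn : (x :: xs).length = xs.length + 1 := by simp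
        have hcnt : pvCnt (x :: xs).length bs = xs.length / bs + 1 := by
          simp [pvCnt, hn]
        rw [hcnt, List.range_succ_eq_map, List.map_cons, List.map_map]
        have hhead : ((x :: xs).drop (0 * bs)).take bs = x :: xs.take (bs - 1) := by
          have hb : bs = (bs - 1) + 1 := by omega
          rw [Nat.zero_mul, List.drop_zero, hb]; simp
        have htail : ∀ k : Nat, ((x :: xs).drop ((k + 1) * bs)).take bs
            = ((xs.drop (bs - 1)).drop (k * bs)).take bs := by
          intro k
          have h1 : (k + 1) * bs = (bs - 1) + 1 + k * bs := by
            have hb : (bs - 1) + 1 = bs := by omega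
            rw [hb]; ring
          rw [h1, ← List.drop_drop, List.drop_succ_cons]
        have hcnt' : xs.length / bs = pvCnt (xs.drop (bs - 1)).length bs := by
          simp only [List.length_drop, pvCnt]
          by_cases hle : xs.length ≤ bs - 1
          · rw [if_pos (by omega)]
            exact Nat.div_eq_of_lt (by omega)
          · rw [if_neg (by omega)]
            have h2 : xs.length - (bs - 1) - 1 = xs.length - bs := by omega
            rw [h2]
            have h3 : xs.length = (xs.length - bs) + bs := by omega
            conv_lhs => rw [h3]
            rw [Nat.add_div_right _ (by omega)]
        rw [pvChunk]
        refine List.cons_eq_cons.mpr ⟨hhead, ?_⟩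
        rw [← ihN (xs.drop (bs - 1)) (by simp [List.length_drop] at *; omega), ← hcnt']
        exact List.map_congr_left (fun k _ => by
          simp only [Function.comp, Nat.succ_eq_add_one]
          exact htail k)
  exact fun urls => H urls.length urls (le_refl _)

theorem pv_length_pvChunk (bs : Nat) (hbs : 1 ≤ bs) (urls : List String) :
    (pvChunk bs urls).length = pvCnt urls.length bs := by
  rw [← pv_chunk_map bs hbs urls]; simp

-- pvChunk with width 1 is the list of singletons
theorem pv_chunk_one (urls : List String) : pvChunk 1 urls = urls.map (fun u => [u]) := by
  induction urls with
  | nil => simp [pvChunk]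
  | cons x xs ih => rw [pvChunk]; simp [ih]

-- the merge fold over singleton batches with nonpositive target is the identity
theorem pv_merge_singles (t : Int) (ht : t ≤ 0) :
    ∀ (l : List String) (acc : List (List String)),
      (l.map (fun u => [u])).foldl (fun st b =>
          if ((st.2 ++ b).length : Int) ≥ t
          then (st.1 ++ [st.2 ++ b], ([] : List String))
          else (st.1, st.2 ++ b))
        (acc, ([] : List String))
      = (acc ++ l.map (fun u => [u]), ([] : List String)) := by
  intro l
  induction l with
  | nil => intro acc; simp
  | cons u us ih =>
    intro acc
    simp only [List.map_cons, List.foldl_cons]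
    rw [if_pos (by simp; omega)]
    rw [ih]
    simp

-- phase 1 of A equals pvChunk, for any batch width ≥ 1 (stated over a Nat width)
theorem pv_phase1 (urls : List String) (bs : Nat) (hbs : 1 ≤ bs) :
    (PySem.List.pyRange 0 (urls.length : Int) (bs : Int)).foldl (fun acc i =>
        if PySem.List.slice urls (some i) (some (i + (bs : Int))) ≠ []
        then acc ++ [PySem.List.slice urls (some i) (some (i + (bs : Int)))]
        else acc) []
      = pvChunk bs urls := by
  have hbsI : (0 : Int) < (bs : Int) := by exact_mod_cast hbs
  rw [PySem.List.pyRange_of_pos 0 (urls.length : Int) hbsI]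
  have hcnt : (if (0 : Int) < (urls.length : Int)
      then (((urls.length : Int) - 0 + (bs : Int) - 1) / (bs : Int)).toNat else 0)
      = pvCnt urls.length bs := by
    by_cases h0 : urls.length = 0
    · simp [h0, pvCnt]
    · rw [if_pos (by exact_mod_cast Nat.pos_of_ne_zero h0)]
      have h1 : ((urls.length : Int) - 0 + (bs : Int) - 1) = ((urls.length + bs - 1 : Nat) : Int) := by
        omega
      rw [h1, ← Int.natCast_div, Int.toNat_natCast]
      have h2 : urls.length + bs - 1 = (urls.length - 1) + bs := by omega
      rw [h2, Nat.add_div_right _ (by omega), pvCnt, if_neg h0]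
  rw [hcnt]
  have hslice : ∀ k : Nat, k < pvCnt urls.length bs →
      PySem.List.slice urls (some ((0 : Int) + (bs : Int) * (k : Int)))
          (some ((0 : Int) + (bs : Int) * (k : Int) + (bs : Int)))
        = (urls.drop (k * bs)).take bs := by
    intro k _
    have h1 : (0 : Int) + (bs : Int) * (k : Int) = ((k * bs : Nat) : Int) := by push_cast; ring
    rw [h1]
    exact PySem.List.slice_natCast_add urls (k * bs) bs
  have hne : ∀ i ∈ (List.range (pvCnt urls.length bs)).map (fun k : Nat => (0 : Int) + (bs : Int) * (k : Int)),
      PySem.List.slice urls (some i) (some (i + (bs : Int))) ≠ [] := by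
    intro i hi
    rcases List.mem_map.mp hi with ⟨k, hk, rfl⟩
    have hk' := List.mem_range.mp hk
    rw [hslice k hk']
    have hlt : k * bs < urls.length := by
      have h0 : urls.length ≠ 0 := by
        intro h; rw [h] at hk'; simp [pvCnt] at hk'
      have hkle : k ≤ (urls.length - 1) / bs := by
        simp only [pvCnt, if_neg h0] at hk'; omega
      have hdm : (urls.length - 1) / bs * bs ≤ urls.length - 1 := Nat.div_mul_le_self _ _
      have hmul : k * bs ≤ (urls.length - 1) / bs * bs := Nat.mul_le_mul_right _ hkle
      omega
    have hlen : ((urls.drop (k * bs)).take bs).length = min bs (urls.length - k * bs) := by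
      simp
    intro hcon
    rw [hcon] at hlen
    simp at hlen
    omega
  rw [pv_foldA urls (bs : Int) _ [] hne, List.nil_append, List.map_map]
  rw [← pv_chunk_map bs hbs urls]
  exact List.map_congr_left (fun k hk => by
    simp only [Function.comp]
    exact hslice k (List.mem_range.mp hk))

-- the chunk count never exceeds 2 * max_workers (positive workers)
theorem pv_cnt_le (n w : Nat) (hw : 1 ≤ w) : pvCnt n (max 1 (n / w)) ≤ 2 * w := by
  by_cases h0 : n = 0
  · simp [pvCnt, h0]
  · rw [pvCnt, if_neg h0]
    by_cases hq : n / w = 0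
    · have hnw : n < w := Nat.lt_of_div_eq_zero (by omega) hq
      rw [hq, show max 1 0 = 1 from rfl, Nat.div_one]
      omega
    · have hq1 : 1 ≤ n / w := Nat.pos_of_ne_zero hq
      have hmax : max 1 (n / w) = n / w := Nat.max_eq_right hq1
      rw [hmax]
      have hmod : w * (n / w) + n % w = n := Nat.div_add_mod n w
      have hr : n % w < w := Nat.mod_lt _ (by omega)
      have hwq : w * 1 ≤ w * (n / w) := Nat.mul_le_mul_left _ hq1
      have hlt : n - 1 < 2 * w * (n / w) := by
        have h3 : w * (n / w) + w * (n / w) = 2 * w * (n / w) := by ring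
        omega
      have := (Nat.div_lt_iff_lt_mul (by omega : 0 < n / w)).mpr hlt
      omega

-- floor division of a nonnegative numerator by a negative divisor is nonpositive
theorem pv_floordiv_nonpos (a b : Int) (ha : 0 ≤ a) (hb : b < 0) :
    PySem.Int.floordiv a b ≤ 0 := by
  by_contra h
  rw [not_le] at h
  have hmod := PySem.Int.mod_neg_bounds a hb
  have heq := PySem.Int.floordiv_mul_add_mod a b
  have : PySem.Int.floordiv a b * b < 0 := mul_neg_of_pos_of_neg h hb
  omega


-- a short nonempty list is a single chunk
theorem pv_chunk_short (bs : Nat) (l : List String) (h0 : l ≠ []) (hle : l.length ≤ bs) :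
    pvChunk bs l = [l] := by
  match l with
  | [] => exact absurd rfl h0
  | x :: xs =>
    rw [pvChunk, List.take_of_length_le (by simp at hle ⊢; omega),
        List.drop_eq_nil_of_le (by simp at hle ⊢; omega)]
    simp [pvChunk]

-- a full-width prefix is split off as the first chunk
theorem pv_chunk_exact (bs : Nat) (hbs : 1 ≤ bs) (l rest : List String) (hl : l.length = bs) :
    pvChunk bs (l ++ rest) = l :: pvChunk bs rest := by
  match l with
  | [] => simp at hl; omega
  | x :: xs =>
    have h1 : xs.length = bs - 1 := by simp at hl; omega
    rw [List.cons_append, pvChunk, List.take_left' h1, List.drop_left' h1]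

-- B's fill-and-flush pass computes pvChunk
theorem pv_fold_chunk (bs : Nat) (hbs : 1 ≤ bs) :
    ∀ (urls : List String) (acc : List (List String)) (pre : List String), pre.length < bs →
      (if (urls.foldl (fun st url =>
            if ((st.2 ++ [url]).length : Int) = ((bs : Nat) : Int)
            then (st.1 ++ [st.2 ++ [url]], ([] : List String))
            else (st.1, st.2 ++ [url])) (acc, pre)).2 ≠ []
       then (urls.foldl (fun st url =>
            if ((st.2 ++ [url]).length : Int) = ((bs : Nat) : Int)
            then (st.1 ++ [st.2 ++ [url]], ([] : List String))
            else (st.1, st.2 ++ [url])) (acc, pre)).1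
          ++ [(urls.foldl (fun st url =>
            if ((st.2 ++ [url]).length : Int) = ((bs : Nat) : Int)
            then (st.1 ++ [st.2 ++ [url]], ([] : List String))
            else (st.1, st.2 ++ [url])) (acc, pre)).2]
       else (urls.foldl (fun st url =>
            if ((st.2 ++ [url]).length : Int) = ((bs : Nat) : Int)
            then (st.1 ++ [st.2 ++ [url]], ([] : List String))
            else (st.1, st.2 ++ [url])) (acc, pre)).1)
      = acc ++ pvChunk bs (pre ++ urls) := by
  intro urls
  induction urls with
  | nil =>
    intro acc pre hpre
    simp only [List.foldl_nil, List.append_nil]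
    match pre with
    | [] => simp [pvChunk]
    | x :: xs =>
      rw [if_pos (List.cons_ne_nil x xs), pv_chunk_short bs (x :: xs) (List.cons_ne_nil x xs) (by omega)]
  | cons u rest ih =>
    intro acc pre hpre
    simp only [List.foldl_cons]
    by_cases hfull : (((pre ++ [u]).length : Nat) : Int) = ((bs : Nat) : Int)
    · rw [if_pos hfull]
      rw [ih (acc ++ [pre ++ [u]]) [] (by simp only [List.length_nil]; omega), List.nil_append]
      rw [List.append_cons pre u rest,
          pv_chunk_exact bs hbs (pre ++ [u]) rest (by exact_mod_cast hfull)]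
      simp
    · rw [if_neg hfull]
      rw [ih acc (pre ++ [u]) (by
        have : (pre ++ [u]).length ≠ bs := fun h => hfull (by exact_mod_cast h)
        simp at this ⊢
        omega)]
      rw [List.append_cons pre u rest]

-- ===== VERDICT (by name: the statement is the Claim_ definition above) =====
theorem create_intelligent_batches_py_spec : Claim_equal_create_intelligent_batches_py := by
  intro urls mw _ hpre
  unfold Spec_create_intelligent_batches_py
  simp only [create_intelligent_batches_py, create_intelligent_batches_py_alt]
  rcases lt_or_gt_of_ne hpre with hneg | hpos
  · -- negative max_workers: width 1, and the merge fold is the identity on singleton batches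
    have ht : PySem.Int.floordiv (urls.length : Int) mw ≤ 0 :=
      pv_floordiv_nonpos _ _ (by positivity) hneg
    have hbs : max 1 (PySem.Int.floordiv (urls.length : Int) mw) = (1 : Int) := by omega
    rw [hbs]
    have hphase := pv_phase1 urls 1 (le_refl 1)
    rw [show ((1 : Nat) : Int) = (1 : Int) from rfl] at hphase
    rw [hphase, pv_chunk_one]
    have hfoldB := pv_fold_chunk 1 (le_refl 1) urls [] [] (by simp)
    rw [show ((1 : Nat) : Int) = (1 : Int) from rfl] at hfoldB
    simp only [List.nil_append] at hfoldB
    rw [pv_chunk_one] at hfoldB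
    rw [hfoldB]
    by_cases hcond : (((urls.map (fun u => [u])).length : Nat) : Int) > mw * 2
    · rw [if_pos hcond]
      rw [pv_merge_singles _ ht urls []]
      simp
    · rw [if_neg hcond]
  · -- positive max_workers: the batch count is at most 2 * max_workers, merge phase skipped
    obtain ⟨w, rfl⟩ : ∃ w : Nat, mw = (w : Int) := ⟨mw.toNat, (Int.toNat_of_nonneg (le_of_lt hpos)).symm⟩
    have hw : 1 ≤ w := by exact_mod_cast hpos
    rw [PySem.Int.floordiv_natCast urls.length w]
    have hmaxcast : max 1 ((urls.length / w : Nat) : Int) = ((max 1 (urls.length / w) : Nat) : Int) := by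
      push_cast; rfl
    rw [hmaxcast]
    have hbs1 : 1 ≤ max 1 (urls.length / w) := le_max_left _ _
    rw [pv_phase1 urls (max 1 (urls.length / w)) hbs1]
    rw [pv_fold_chunk (max 1 (urls.length / w)) hbs1 urls [] [] (by simp only [List.length_nil]; omega), List.nil_append, List.nil_append]
    rw [if_neg (by
      rw [pv_length_pvChunk _ hbs1]
      have hle := pv_cnt_le urls.length w hw
      rw [not_lt]
      omega)]
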